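-- pv_equiv track=rewrite | github.com/MohiuddinSohel/Leetcoding | amazonOAPreparation/OA.py | max_equal_cost_packages_correct
-- ===== SOURCE A (Python) =====
-- def max_equal_cost_packages_correct(cost):
--     from collections import Counter
--
--     # Count the frequency of each cost
--     cost_count = Counter(cost)
--     max_packages = 0
--
--     # Iterate over possible target package costs
--     for target_cost in range(min(cost), 2 * max(cost) + 1):  # The maximum possible sum of two costs
--         current_packages = 0
--         temp_count = cost_count.copy()
--         pairs = 0
--
--         for item_cost in temp_count:
--             complement = target_cost - item_cost
--             if item_cost == target_cost:
--                 current_packages += temp_count[item_cost]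
--                 temp_count[item_cost] = 0
--             elif complement in temp_count:
--                 if complement == item_cost:  # Special case for same-cost pairing
--                     pairs = temp_count[item_cost] // 2
--                 else:  # Pair items with different costs
--                     pairs = min(temp_count[item_cost], temp_count[complement])
--
--                 current_packages += pairs
--                 temp_count[item_cost] = 0
--                 temp_count[complement] = 0
--
--         max_packages = max(max_packages, current_packages)
--
--     return max_packages
-- ===== SOURCE B (Python) =====
-- def max_equal_cost_packages_correct(cost):
--     from collections import Counter
--     cnt = Counter(cost)
--     keys = list(cnt)
--     lo, hi = min(cost), 2 * max(cost)
--     # A target is worth evaluating only if it is a present value (a single-item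
--     # package) or the sum of two present values (a paired package).
--     candidates = set(keys) | {x + y for x in keys for y in keys}
--     best = 0
--     for t in candidates:
--         if lo <= t <= hi:
--             total = cnt.get(t, 0)  # single-item packages
--             for x in keys:
--                 c = t - x
--                 if x < c and c in cnt:
--                     total += min(cnt[x], cnt[c])
--                 elif x == c:
--                     total += cnt[x] // 2
--             best = max(best, total)
--     return best
-- ===== Notes on version B (the rewrite author's own statement) =====
-- stated objective: alternative
-- what changed: B evaluates only candidate targets (present values and sums of two present values, within A's scan range) and computes each target's count directly from the immutable counter as singles plus one contribution per unordered pair, instead of scanning every integer in [min, 2*max] with a mutable counter copy; Pre_ excludes the empty list (A raises ValueError on min([])) and lists containing 0, where A's value is an accident of dict insertion order (A returns 1 on [0,5,5] but 2 on the same multiset [5,5,0]).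
-- outside the precondition, e.g. on max_equal_cost_packages_correct([0, 5, 5]): A returns 1, B returns 3; on max_equal_cost_packages_correct([]): A raises ValueError, B raises ValueError
import Mathlib
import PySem

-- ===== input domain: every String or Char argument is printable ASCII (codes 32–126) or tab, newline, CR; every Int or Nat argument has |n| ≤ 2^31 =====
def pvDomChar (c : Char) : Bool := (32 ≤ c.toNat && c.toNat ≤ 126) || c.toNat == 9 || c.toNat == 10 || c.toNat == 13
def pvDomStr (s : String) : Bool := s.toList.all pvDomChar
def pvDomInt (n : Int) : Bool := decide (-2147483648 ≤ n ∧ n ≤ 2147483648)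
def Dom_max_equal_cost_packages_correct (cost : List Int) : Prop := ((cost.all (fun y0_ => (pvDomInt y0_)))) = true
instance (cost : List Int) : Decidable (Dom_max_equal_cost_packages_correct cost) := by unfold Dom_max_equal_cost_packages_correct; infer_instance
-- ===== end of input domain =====

-- B evaluates only candidate targets (present values and sums of two present values) and
-- computes each target's package count directly from the cost counter as singles plus
-- independent pair contributions, instead of scanning every integer in [min, 2*max] with
-- a mutable copy of the counter.

-- ===== PORT A =====
-- the body of A's inner 'for item_cost in temp_count' loop; state = (current_packages, temp_count, pairs)
def pvAStep (t : Int) (st : Int × PySem.Dict Int Int × Int) (item : Int) :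
    Int × PySem.Dict Int Int × Int :=
  let cur := st.1
  let tc := st.2.1
  let pairs := st.2.2
  let comp := t - item
  if item = t then
    (cur + tc.getD item 0, tc.insert item 0, pairs)
  else if tc.contains comp then
    let pairs := if comp = item then PySem.Int.floordiv (tc.getD item 0) 2
                 else min (tc.getD item 0) (tc.getD comp 0)
    (cur + pairs, (tc.insert item 0).insert comp 0, pairs)
  else (cur, tc, pairs)

def max_equal_cost_packages_correct (cost : List Int) : Int :=
  match PySem.List.min? cost (fun x => x), PySem.List.max? cost (fun x => x) with
  | some mn, some mx =>
    let cost_count := PySem.Dict.counter cost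
    (PySem.List.pyRange mn (2 * mx + 1) 1).foldl
      (fun max_packages target =>
        let r := cost_count.keys.foldl (pvAStep target) (0, cost_count, 0)
        max max_packages r.1) 0
  | _, _ => 0   -- unreachable under Pre_ (Python raises ValueError on min([]))

-- ===== PORT B =====
-- the body of B's inner 'for x in keys' loop: the pair contribution of key x for target t
def pvBTerm (cnt : PySem.Dict Int Int) (t x : Int) : Int :=
  let c := t - x
  if x < c ∧ cnt.contains c then min (cnt.getD x 0) (cnt.getD c 0)
  else if x = c then PySem.Int.floordiv (cnt.getD x 0) 2
  else 0

def pvBInner (keys : List Int) (cnt : PySem.Dict Int Int) (t : Int) : Int :=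
  keys.foldl (fun total x => total + pvBTerm cnt t x) (cnt.getD t 0)

def max_equal_cost_packages_correct_alt (cost : List Int) : Int :=
  match PySem.List.min? cost (fun x => x) with
  | none => 0   -- unreachable under Pre_ (Python raises ValueError on min([]))
  | some mn =>
    match PySem.List.max? cost (fun x => x) with
    | none => 0
    | some mx =>
      let cnt := PySem.Dict.counter cost
      let keys := cnt.keys
      let candidates := PySem.Set.union (PySem.Set.ofList keys)
          (PySem.Set.ofList (keys.flatMap (fun x => keys.map (fun y => x + y))))
      candidates.foldl
        (fun best t => if mn ≤ t ∧ t ≤ 2 * mx then max best (pvBInner keys cnt t) else best) 0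

-- ===== PRECONDITION & SPEC =====
-- Pre_ excludes the empty list, on which A raises ValueError (min([])), and lists containing 0,
-- on which A's value is an accident of dict insertion order: the key 0 may pair away the
-- target-valued items before they are counted as singles (A returns 1 on [0,5,5] but 2 on [5,5,0]).
def Pre_max_equal_cost_packages_correct (cost : List Int) : Prop :=
  cost ≠ [] ∧ (0 : Int) ∉ cost
instance (cost : List Int) : Decidable (Pre_max_equal_cost_packages_correct cost) := by
  unfold Pre_max_equal_cost_packages_correct; infer_instance
def pvWitness_max_equal_cost_packages_correct : List Int := [1, 2, 3, 2]

def Spec_max_equal_cost_packages_correct (cost : List Int) (out : Int) : Prop := out = max_equal_cost_packages_correct_alt cost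
instance (cost : List Int) (out : Int) : Decidable (Spec_max_equal_cost_packages_correct cost out) := by unfold Spec_max_equal_cost_packages_correct; infer_instance

-- ===== CLAIM (what is proved, stated in full; the proofs are below) =====
def Claim_equal_max_equal_cost_packages_correct : Prop := ∀ (cost : List Int), Dom_max_equal_cost_packages_correct cost → Pre_max_equal_cost_packages_correct cost → Spec_max_equal_cost_packages_correct cost (max_equal_cost_packages_correct cost)

-- ===== LEMMAS AND PROOFS =====

-- contribution of a still-unprocessed key x to A's inner pass for target t, given the list zs
-- of keys already zeroed; K is the full key list of the counter
def pvPairTerm (cnt : PySem.Dict Int Int) (K : List Int) (t : Int) (zs : List Int) (x : Int) : Int :=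
  if x ∈ zs ∨ x = t ∨ t - x ∉ K then 0
  else if 2 * x = t then PySem.Int.floordiv (cnt.getD x 0) 2
  else if 2 * x < t then min (cnt.getD x 0) (cnt.getD (t - x) 0)
  else 0

theorem pv_foldl_add (f : Int → Int) :
    ∀ (l : List Int) (a : Int), l.foldl (fun s x => s + f x) a = a + (l.map f).sum := by
  intro l
  induction l with
  | nil => intro a; simp
  | cons x l ih => intro a; simp [List.foldl_cons, ih]; ring

theorem pv_sum_map_except (c : Int) (f g : Int → Int) :
    ∀ (l : List Int), l.Nodup → c ∈ l → (∀ x ∈ l, x ≠ c → f x = g x) →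
      (l.map f).sum = (l.map g).sum + f c - g c := by
  intro l
  induction l with
  | nil => intro _ hc; cases hc
  | cons y l ih =>
    intro hnd hc h
    rcases List.mem_cons.mp hc with hy | hy
    · subst hy
      have hfg : ∀ x ∈ l, f x = g x := by
        intro x hx
        exact h x (List.mem_cons_of_mem _ hx) (fun he => (List.nodup_cons.mp hnd).1 (he ▸ hx))
      simp [List.map_congr_left hfg]
      ring
    · have hyc : y ≠ c := fun he => (List.nodup_cons.mp hnd).1 (he ▸ hy)
      have hrec := ih (List.nodup_cons.mp hnd).2 hy
        (fun x hx hxc => h x (List.mem_cons_of_mem _ hx) hxc)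
      simp [hrec, h y List.mem_cons_self hyc]
      ring

-- A's inner pass over the remaining keys l, starting from a counter copy with the keys of zs
-- zeroed, equals the explicit sum of per-key contributions
theorem pvA_fold_eq (cnt : PySem.Dict Int Int) (K : List Int) (t : Int)
    (hK : ∀ k, cnt.contains k = true ↔ k ∈ K) (h0 : (0 : Int) ∉ K) :
    ∀ (l zs : List Int) (cur p : Int) (temp : PySem.Dict Int Int),
      l.Nodup → (∀ x ∈ l, x ∈ K) →
      (∀ k, temp.contains k = cnt.contains k) →
      (∀ k, temp.getD k 0 = if k ∈ zs then 0 else cnt.getD k 0) →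
      (∀ x ∈ zs, t - x ∈ K → t - x ∈ zs) →
      (∀ c, c ∈ K → c ∉ l → c ≠ t → t - c ∈ K → c ∈ zs) →
      (t ∈ K → t ∉ l → t ∈ zs) →
      (l.foldl (pvAStep t) (cur, temp, p)).1
        = cur + (if t ∈ l ∧ t ∉ zs then cnt.getD t 0 else 0)
            + (l.map (pvPairTerm cnt K t zs)).sum := by
  intro l
  induction l with
  | nil =>
    intro zs cur p temp _ _ _ _ _ _ _
    simp
  | cons x l ih =>
    intro zs cur p temp hnd hl hcont htemp hsym hproc hproct
    have hxK : x ∈ K := hl x List.mem_cons_self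
    have hxl : x ∉ l := (List.nodup_cons.mp hnd).1
    have hndl : l.Nodup := (List.nodup_cons.mp hnd).2
    have hll : ∀ y ∈ l, y ∈ K := fun y hy => hl y (List.mem_cons_of_mem _ hy)
    have hx0 : x ≠ 0 := fun h => h0 (h ▸ hxK)
    by_cases hxt : x = t
    · -- singles step: item == target
      subst hxt
      have hstep : pvAStep x (cur, temp, p) x = (cur + temp.getD x 0, temp.insert x 0, p) := by
        simp [pvAStep]
      have hc' : ∀ k, (temp.insert x 0).contains k = cnt.contains k := by
        intro k
        by_cases hk : k = x
        · subst hk; simp [PySem.Dict.contains_insert, (hK k).mpr hxK]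
        · simp [PySem.Dict.contains_insert, beq_eq_false_iff_ne.mpr hk, hcont k]
      have ht' : ∀ k, (temp.insert x 0).getD k 0 = if k ∈ x :: zs then 0 else cnt.getD k 0 := by
        intro k
        rw [PySem.Dict.getD_insert]
        by_cases hk : k = x
        · simp [hk]
        · simp [hk, htemp k, List.mem_cons]
      have hsym' : ∀ y ∈ x :: zs, x - y ∈ K → x - y ∈ x :: zs := by
        intro y hy hyK
        rcases List.mem_cons.mp hy with hy' | hy'
        · exfalso; apply h0; subst hy'; simpa using hyK
        · exact List.mem_cons_of_mem _ (hsym y hy' hyK)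
      have hproc' : ∀ c, c ∈ K → c ∉ l → c ≠ x → x - c ∈ K → c ∈ x :: zs := by
        intro c hc1 hc2 hc3 hc4
        refine List.mem_cons_of_mem _ (hproc c hc1 ?_ hc3 hc4)
        simp only [List.mem_cons, not_or]
        exact ⟨hc3, hc2⟩
      rw [List.foldl_cons, hstep,
        ih (x :: zs) _ _ _ hndl hll hc' ht' hsym' hproc' (fun _ _ => List.mem_cons_self)]
      have hSum : l.map (pvPairTerm cnt K x (x :: zs)) = l.map (pvPairTerm cnt K x zs) := by
        apply List.map_congr_left
        intro y hy
        unfold pvPairTerm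
        by_cases hyx : y = x
        · simp [hyx]
        · simp [List.mem_cons, hyx]
      rw [hSum, htemp x]
      have hterm : pvPairTerm cnt K x zs x = 0 := by simp [pvPairTerm]
      simp only [List.map_cons, List.sum_cons, hterm]
      by_cases htz : x ∈ zs
      · simp [htz, hxl]
      · simp [htz, hxl]
    · by_cases hcK : t - x ∈ K
      · -- pairing step fires: complement present
        have hcb : temp.contains (t - x) = true := by rw [hcont]; exact (hK _).mpr hcK
        have htnx : t - x ≠ t := fun h => hx0 (by omega)
        have htx2 : t ≠ x := fun h => hxt h.symm
        have hstep : pvAStep t (cur, temp, p) x =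
            (cur + (if t - x = x then PySem.Int.floordiv (temp.getD x 0) 2
                    else min (temp.getD x 0) (temp.getD (t - x) 0)),
             (temp.insert x 0).insert (t - x) 0,
             (if t - x = x then PySem.Int.floordiv (temp.getD x 0) 2
              else min (temp.getD x 0) (temp.getD (t - x) 0))) := by
          simp [pvAStep, hxt, hcb]
        have hc' : ∀ k, ((temp.insert x 0).insert (t - x) 0).contains k = cnt.contains k := by
          intro k
          by_cases hk1 : k = t - x
          · simp [PySem.Dict.contains_insert, hk1, (hK (t - x)).mpr hcK]
          · by_cases hk2 : k = x
            · simp [PySem.Dict.contains_insert, hk2, beq_eq_false_iff_ne.mpr hk1,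
                (hK x).mpr hxK]
            · simp [PySem.Dict.contains_insert, beq_eq_false_iff_ne.mpr hk1,
                beq_eq_false_iff_ne.mpr hk2, hcont k]
        have ht' : ∀ k, ((temp.insert x 0).insert (t - x) 0).getD k 0
            = if k ∈ (t - x) :: x :: zs then 0 else cnt.getD k 0 := by
          intro k
          rw [PySem.Dict.getD_insert, PySem.Dict.getD_insert]
          by_cases hk1 : k = t - x
          · simp [hk1]
          · by_cases hk2 : k = x
            · simp [hk1, hk2]
            · simp [hk1, hk2, htemp k, List.mem_cons]
        have hsym' : ∀ y ∈ (t - x) :: x :: zs, t - y ∈ K → t - y ∈ (t - x) :: x :: zs := by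
          intro y hy hyK
          rcases List.mem_cons.mp hy with hy' | hy'
          · subst hy'
            rw [show t - (t - x) = x from by ring]
            exact List.mem_cons_of_mem _ List.mem_cons_self
          · rcases List.mem_cons.mp hy' with hy'' | hy''
            · subst hy''; exact List.mem_cons_self
            · exact List.mem_cons_of_mem _ (List.mem_cons_of_mem _ (hsym y hy'' hyK))
        have hproc' : ∀ c, c ∈ K → c ∉ l → c ≠ t → t - c ∈ K → c ∈ (t - x) :: x :: zs := by
          intro c hc1 hc2 hc3 hc4
          by_cases hcx : c = x
          · exact hcx ▸ List.mem_cons_of_mem _ List.mem_cons_self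
          · by_cases hcc : c = t - x
            · exact hcc ▸ List.mem_cons_self
            · refine List.mem_cons_of_mem _ (List.mem_cons_of_mem _
                (hproc c hc1 ?_ hc3 hc4))
              simp only [List.mem_cons, not_or]
              exact ⟨hcx, hc2⟩
        have hproct' : t ∈ K → t ∉ l → t ∈ (t - x) :: x :: zs := by
          intro h1 h2
          refine List.mem_cons_of_mem _ (List.mem_cons_of_mem _ (hproct h1 ?_))
          simp only [List.mem_cons, not_or]
          exact ⟨htx2, h2⟩
        rw [List.foldl_cons, hstep,
          ih ((t - x) :: x :: zs) _ _ _ hndl hll hc' ht' hsym' hproc' hproct']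
        have htmem : (t ∈ l ∧ t ∉ (t - x) :: x :: zs) ↔ (t ∈ x :: l ∧ t ∉ zs) := by
          simp only [List.mem_cons, not_or]
          constructor
          · rintro ⟨h1, _, _, h4⟩; exact ⟨Or.inr h1, h4⟩
          · rintro ⟨h1, h2⟩
            rcases h1 with h1 | h1
            · exact absurd h1 htx2
            · exact ⟨h1, Ne.symm htnx, htx2, h2⟩
        by_cases hxz : x ∈ zs
        · -- both counts already zeroed: the step adds 0
          have hcz : t - x ∈ zs := hsym x hxz hcK
          have htx0 : temp.getD x 0 = 0 := by simp [htemp x, hxz]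
          have htc0 : temp.getD (t - x) 0 = 0 := by simp [htemp (t - x), hcz]
          have hP : (if t - x = x then PySem.Int.floordiv (temp.getD x 0) 2
              else min (temp.getD x 0) (temp.getD (t - x) 0)) = 0 := by
            rw [htx0, htc0]
            split_ifs <;> simp [PySem.Int.floordiv]
          have hSum : l.map (pvPairTerm cnt K t ((t - x) :: x :: zs))
              = l.map (pvPairTerm cnt K t zs) := by
            apply List.map_congr_left
            intro y hy
            unfold pvPairTerm
            have hmem : y ∈ (t - x) :: x :: zs ↔ y ∈ zs := by
              simp only [List.mem_cons]
              constructor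
              · rintro (h | h | h)
                · exact h ▸ hcz
                · exact h ▸ hxz
                · exact h
              · exact fun h => Or.inr (Or.inr h)
            simp only [hmem]
          have hterm : pvPairTerm cnt K t zs x = 0 := by simp [pvPairTerm, hxz]
          rw [hP, hSum]
          simp only [List.map_cons, List.sum_cons, hterm, if_congr htmem rfl rfl]
          ring
        · have hcz : t - x ∉ zs := by
            intro h
            apply hxz
            have := hsym (t - x) h (by rw [show t - (t - x) = x from by ring]; exact hxK)
            rwa [show t - (t - x) = x from by ring] at this
          have htx : temp.getD x 0 = cnt.getD x 0 := by simp [htemp x, hxz]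
          have htc : temp.getD (t - x) 0 = cnt.getD (t - x) 0 := by
            simp [htemp (t - x), hcz]
          by_cases hcx : t - x = x
          · -- same-cost pairing: floor halves
            have hP : (if t - x = x then PySem.Int.floordiv (temp.getD x 0) 2
                else min (temp.getD x 0) (temp.getD (t - x) 0))
                = PySem.Int.floordiv (cnt.getD x 0) 2 := by simp [hcx, htx]
            have hterm : pvPairTerm cnt K t zs x = PySem.Int.floordiv (cnt.getD x 0) 2 := by
              unfold pvPairTerm
              rw [if_neg (by simp [hxz, hxt, hcK]), if_pos (by omega)]
            have hSum : l.map (pvPairTerm cnt K t ((t - x) :: x :: zs))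
                = l.map (pvPairTerm cnt K t zs) := by
              apply List.map_congr_left
              intro y hy
              have hyx : y ≠ x := fun he => hxl (he ▸ hy)
              unfold pvPairTerm
              simp only [List.mem_cons, hcx, hyx, or_false, false_or]
            rw [hP, hSum]
            simp only [List.map_cons, List.sum_cons, hterm, if_congr htmem rfl rfl]
            ring
          · have hP : (if t - x = x then PySem.Int.floordiv (temp.getD x 0) 2
                else min (temp.getD x 0) (temp.getD (t - x) 0))
                = min (cnt.getD x 0) (cnt.getD (t - x) 0) := by simp [hcx, htx, htc]
            by_cases hlt : x < t - x
            · -- x is the smaller end: B attributes the pair to x as well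
              have hterm : pvPairTerm cnt K t zs x
                  = min (cnt.getD x 0) (cnt.getD (t - x) 0) := by
                unfold pvPairTerm
                rw [if_neg (by simp [hxz, hxt, hcK]), if_neg (by omega), if_pos (by omega)]
              have hSum : l.map (pvPairTerm cnt K t ((t - x) :: x :: zs))
                  = l.map (pvPairTerm cnt K t zs) := by
                apply List.map_congr_left
                intro y hy
                have hyx : y ≠ x := fun he => hxl (he ▸ hy)
                by_cases hyc : y = t - x
                · subst hyc
                  unfold pvPairTerm
                  rw [if_pos (by simp [List.mem_cons]),
                    if_neg (by
                      simp only [not_or, not_not]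
                      refine ⟨hcz, htnx, ?_⟩
                      rw [show t - (t - x) = x from by ring]; exact hxK),
                    if_neg (by omega), if_neg (by omega)]
                · unfold pvPairTerm
                  simp only [List.mem_cons, hyx, hyc, or_false, false_or]
              rw [hP, hSum]
              simp only [List.map_cons, List.sum_cons, hterm, if_congr htmem rfl rfl]
              ring
            · -- x is the larger end: B's term sits at the complement, still in l
              have hterm : pvPairTerm cnt K t zs x = 0 := by
                unfold pvPairTerm
                rw [if_neg (by simp [hxz, hxt, hcK]), if_neg (by omega), if_neg (by omega)]
              have hcl : t - x ∈ l := by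
                have hmem : t - x ∈ x :: l := by
                  by_contra hno
                  exact hcz (hproc (t - x) hcK hno htnx
                    (by rw [show t - (t - x) = x from by ring]; exact hxK))
                rcases List.mem_cons.mp hmem with h | h
                · exact absurd h hcx
                · exact h
              have hsum := pv_sum_map_except (t - x)
                (pvPairTerm cnt K t zs) (pvPairTerm cnt K t ((t - x) :: x :: zs)) l hndl hcl
                (by
                  intro y hy hyc
                  have hyx : y ≠ x := fun he => hxl (he ▸ hy)
                  unfold pvPairTerm
                  simp only [List.mem_cons, hyx, hyc, or_false, false_or])
              have hfc : pvPairTerm cnt K t zs (t - x)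
                  = min (cnt.getD (t - x) 0) (cnt.getD x 0) := by
                unfold pvPairTerm
                rw [if_neg (by
                      simp only [not_or, not_not]
                      refine ⟨hcz, htnx, ?_⟩
                      rw [show t - (t - x) = x from by ring]; exact hxK),
                  if_neg (by omega), if_pos (by omega),
                  show t - (t - x) = x from by ring]
              have hgc : pvPairTerm cnt K t ((t - x) :: x :: zs) (t - x) = 0 := by
                unfold pvPairTerm
                rw [if_pos (Or.inl List.mem_cons_self)]
              rw [hP]
              rw [hfc, hgc] at hsum
              simp only [List.map_cons, List.sum_cons, hterm, if_congr htmem rfl rfl]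
              rw [min_comm (cnt.getD x 0) (cnt.getD (t - x) 0)]
              omega
      · -- complement absent: the step is a no-op
        have hcb : temp.contains (t - x) = false := by
          rw [hcont]
          by_contra h
          exact hcK ((hK _).mp (by simpa using h))
        have htx2 : t ≠ x := fun h => hxt h.symm
        have hstep : pvAStep t (cur, temp, p) x = (cur, temp, p) := by
          simp [pvAStep, hxt, hcb]
        have hproc' : ∀ c, c ∈ K → c ∉ l → c ≠ t → t - c ∈ K → c ∈ zs := by
          intro c hc1 hc2 hc3 hc4
          by_cases hcx : c = x
          · exact absurd (hcx ▸ hc4) hcK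
          · refine hproc c hc1 ?_ hc3 hc4
            simp only [List.mem_cons, not_or]
            exact ⟨hcx, hc2⟩
        have hproct' : t ∈ K → t ∉ l → t ∈ zs := by
          intro h1 h2
          refine hproct h1 ?_
          simp only [List.mem_cons, not_or]
          exact ⟨htx2, h2⟩
        rw [List.foldl_cons, hstep,
          ih zs _ _ _ hndl hll hcont htemp hsym hproc' hproct']
        have hterm : pvPairTerm cnt K t zs x = 0 := by
          unfold pvPairTerm
          rw [if_pos (Or.inr (Or.inr hcK))]
        have htmem : (t ∈ l ∧ t ∉ zs) ↔ (t ∈ x :: l ∧ t ∉ zs) := by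
          simp only [List.mem_cons]
          constructor
          · rintro ⟨h1, h2⟩; exact ⟨Or.inr h1, h2⟩
          · rintro ⟨h1, h2⟩
            rcases h1 with h1 | h1
            · exact absurd h1 htx2
            · exact ⟨h1, h2⟩
        simp only [List.map_cons, List.sum_cons, hterm, if_congr htmem rfl rfl]
        ring

-- running-max fold (A's outer loop)
theorem pv_le_foldl_max (f : Int → Int) (L : List Int) :
    ∀ a : Int, a ≤ L.foldl (fun m t => max m (f t)) a := by
  induction L with
  | nil => intro a; exact le_refl a
  | cons x xs ih => intro a; exact le_trans (le_max_left a (f x)) (ih _)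

theorem pv_foldl_max_le (f : Int → Int) (L : List Int) (b : Int) :
    ∀ a : Int, a ≤ b → (∀ t ∈ L, f t ≤ b) → L.foldl (fun m t => max m (f t)) a ≤ b := by
  induction L with
  | nil => intro a h _; exact h
  | cons x xs ih =>
    intro a h hf
    exact ih _ (max_le h (hf x (by simp))) (fun t ht => hf t (List.mem_cons_of_mem _ ht))

theorem pv_foldl_max_mem_le (f : Int → Int) (L : List Int) (t : Int) :
    ∀ a : Int, t ∈ L → f t ≤ L.foldl (fun m t => max m (f t)) a := by
  induction L with
  | nil => intro a ht; cases ht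
  | cons x xs ih =>
    intro a ht
    rcases List.mem_cons.mp ht with h | h
    · subst h
      exact le_trans (le_max_right a (f t)) (pv_le_foldl_max f xs _)
    · exact ih _ h

-- guarded running-max fold (B's outer loop takes the max only for in-range targets)
theorem pv_le_gfoldl (f : Int → Int) (p : Int → Prop) [DecidablePred p] (L : List Int) :
    ∀ a : Int, a ≤ L.foldl (fun m t => if p t then max m (f t) else m) a := by
  induction L with
  | nil => intro a; exact le_refl a
  | cons x xs ih =>
    intro a
    simp only [List.foldl_cons]
    split_ifs
    · exact le_trans (le_max_left a (f x)) (ih _)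
    · exact ih _

theorem pv_gfoldl_le (f : Int → Int) (p : Int → Prop) [DecidablePred p] (L : List Int) (b : Int) :
    ∀ a : Int, a ≤ b → (∀ t ∈ L, p t → f t ≤ b) →
      L.foldl (fun m t => if p t then max m (f t) else m) a ≤ b := by
  induction L with
  | nil => intro a h _; exact h
  | cons x xs ih =>
    intro a h hf
    simp only [List.foldl_cons]
    split_ifs with hp
    · exact ih _ (max_le h (hf x (by simp) hp)) (fun t ht h' => hf t (List.mem_cons_of_mem _ ht) h')
    · exact ih _ h (fun t ht h' => hf t (List.mem_cons_of_mem _ ht) h')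

theorem pv_gfoldl_mem_le (f : Int → Int) (p : Int → Prop) [DecidablePred p] (L : List Int)
    (t : Int) (hp : p t) :
    ∀ a : Int, t ∈ L → f t ≤ L.foldl (fun m t => if p t then max m (f t) else m) a := by
  induction L with
  | nil => intro a ht; cases ht
  | cons x xs ih =>
    intro a ht
    simp only [List.foldl_cons]
    rcases List.mem_cons.mp ht with h | h
    · subst h
      rw [if_pos hp]
      exact le_trans (le_max_right a (f t)) (pv_le_gfoldl f p xs _)
    · exact ih _ h

-- ===== VERDICT (by name: the statement is the Claim_ definition above) =====
-- A's inner pass equals B's direct per-target computation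
theorem pv_inner_eq (cost : List Int) (h0 : (0 : Int) ∉ cost) (t : Int) :
    ((PySem.Dict.counter cost).keys.foldl (pvAStep t) (0, PySem.Dict.counter cost, 0)).1
      = pvBInner (PySem.Dict.counter cost).keys (PySem.Dict.counter cost) t := by
  set cnt := PySem.Dict.counter cost with hcnt
  set keys := cnt.keys with hkeys
  have hKiff : ∀ k : Int, cnt.contains k = true ↔ k ∈ keys :=
    fun k => PySem.Dict.contains_iff_mem_keys cnt k
  have hmemk : ∀ k : Int, k ∈ keys ↔ k ∈ cost := by
    intro k
    rw [hkeys, hcnt, PySem.Dict.keys_counter, PySem.Set.mem_ofList]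
  have h0K : (0 : Int) ∉ keys := fun h => h0 ((hmemk 0).mp h)
  have hnd : keys.Nodup := by rw [hkeys, hcnt]; exact PySem.Dict.nodup_keys_counter cost
  have hd0 : ∀ s : Int, s ∉ keys → cnt.getD s 0 = 0 := by
    intro s hs
    rw [hcnt, PySem.Dict.getD_counter]
    simp [List.count_eq_zero.mpr (fun h => hs ((hmemk s).mpr h))]
  rw [pvA_fold_eq cnt keys t hKiff h0K keys [] 0 0 cnt hnd (fun x hx => hx)
    (fun k => rfl) (fun k => by simp) (by simp)
    (fun c hc1 hc2 _ _ => absurd hc1 hc2) (fun h1 h2 => absurd h1 h2)]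
  unfold pvBInner
  rw [pv_foldl_add]
  have hif : (if t ∈ keys ∧ t ∉ ([] : List Int) then cnt.getD t 0 else 0) = cnt.getD t 0 := by
    by_cases ht : t ∈ keys
    · simp [ht]
    · simp [ht, hd0 t ht]
  have hmapeq : keys.map (pvPairTerm cnt keys t []) = keys.map (pvBTerm cnt t) := by
    apply List.map_congr_left
    intro x hx
    unfold pvPairTerm pvBTerm
    by_cases hcK : t - x ∈ keys
    · have hcb : cnt.contains (t - x) = true := (hKiff _).mpr hcK
      have hxt : x ≠ t := by
        intro h
        apply h0K
        have he : t - x = 0 := by omega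
        rwa [he] at hcK
      by_cases hlt : x < t - x
      · rw [if_neg (by simp [hxt, hcK]), if_neg (by omega), if_pos (by omega),
          if_pos ⟨hlt, hcb⟩]
      · by_cases hcx : x = t - x
        · rw [if_neg (by simp [hxt, hcK]), if_pos (by omega),
            if_neg (fun h => hlt h.1), if_pos hcx]
        · rw [if_neg (by simp [hxt, hcK]), if_neg (by omega), if_neg (by omega),
            if_neg (fun h => hlt h.1), if_neg hcx]
    · have hcb : ¬(cnt.contains (t - x) = true) := fun h => hcK ((hKiff _).mp h)
      rw [if_pos (Or.inr (Or.inr hcK)), if_neg (by simp [hcb]),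
        if_neg (fun h => hcK (by rw [← h]; exact hx))]
  rw [hif, hmapeq]
  ring

-- a target that is neither a present value nor a sum of two present values yields 0
theorem pv_inner_zero (cost : List Int) (t : Int)
    (htc : t ∉ PySem.Set.union (PySem.Set.ofList (PySem.Dict.counter cost).keys)
      (PySem.Set.ofList ((PySem.Dict.counter cost).keys.flatMap
        (fun x => (PySem.Dict.counter cost).keys.map (fun y => x + y))))) :
    pvBInner (PySem.Dict.counter cost).keys (PySem.Dict.counter cost) t = 0 := by
  set cnt := PySem.Dict.counter cost with hcnt
  set keys := cnt.keys with hkeys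
  have hmemk : ∀ k : Int, k ∈ keys ↔ k ∈ cost := by
    intro k
    rw [hkeys, hcnt, PySem.Dict.keys_counter, PySem.Set.mem_ofList]
  have hsum : ∀ x ∈ keys, ∀ y ∈ keys, t ≠ x + y := by
    intro x hx y hy he
    refine htc ?_
    simp only [PySem.Set.mem_union, PySem.Set.mem_ofList]
    exact Or.inr (List.mem_flatMap.mpr ⟨x, hx, List.mem_map.mpr ⟨y, hy, he.symm⟩⟩)
  have ht1 : t ∉ keys := by
    intro h
    refine htc ?_
    simp only [PySem.Set.mem_union, PySem.Set.mem_ofList]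
    exact Or.inl h
  have hd0 : cnt.getD t 0 = 0 := by
    rw [hcnt, PySem.Dict.getD_counter]
    simp [List.count_eq_zero.mpr (fun h => ht1 ((hmemk t).mpr h))]
  unfold pvBInner
  rw [pv_foldl_add, hd0]
  have hmap : keys.map (pvBTerm cnt t) = keys.map (fun _ => (0 : Int)) := by
    apply List.map_congr_left
    intro x hx
    unfold pvBTerm
    have hcb : ¬(cnt.contains (t - x) = true) := by
      intro h
      have hck : t - x ∈ keys := (PySem.Dict.contains_iff_mem_keys _ _).mp h
      exact hsum x hx (t - x) hck (by ring)
    rw [if_neg (by simp [hcb]), if_neg (fun h => hsum x hx x hx (by omega))]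
  rw [hmap]
  simp


-- ===== VERDICT (by name: the statement is the Claim_ definition above) =====
theorem max_equal_cost_packages_correct_spec : Claim_equal_max_equal_cost_packages_correct := by
  intro cost _ hpre
  obtain ⟨hne, h0c⟩ := hpre
  unfold Spec_max_equal_cost_packages_correct
  obtain ⟨mn, hmn⟩ : ∃ mn, PySem.List.min? cost (fun x => x) = some mn := by
    cases h : PySem.List.min? cost (fun x => x) with
    | none => exact absurd ((PySem.List.min?_eq_none_iff cost _).mp h) hne
    | some mn => exact ⟨mn, rfl⟩
  obtain ⟨mx, hmx⟩ : ∃ mx, PySem.List.max? cost (fun x => x) = some mx := by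
    cases h : PySem.List.max? cost (fun x => x) with
    | none => exact absurd ((PySem.List.max?_eq_none_iff cost _).mp h) hne
    | some mx => exact ⟨mx, rfl⟩
  have hA : max_equal_cost_packages_correct cost
      = (PySem.List.pyRange mn (2 * mx + 1) 1).foldl
          (fun m t => max m
            (((PySem.Dict.counter cost).keys.foldl (pvAStep t)
              (0, PySem.Dict.counter cost, 0)).1)) 0 := by
    simp only [max_equal_cost_packages_correct, hmn, hmx]
  have hB : max_equal_cost_packages_correct_alt cost
      = (PySem.Set.union (PySem.Set.ofList (PySem.Dict.counter cost).keys)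
          (PySem.Set.ofList ((PySem.Dict.counter cost).keys.flatMap
            (fun x => (PySem.Dict.counter cost).keys.map (fun y => x + y))))).foldl
          (fun best t => if mn ≤ t ∧ t ≤ 2 * mx then
            max best (pvBInner (PySem.Dict.counter cost).keys (PySem.Dict.counter cost) t)
            else best) 0 := by
    simp only [max_equal_cost_packages_correct_alt, hmn, hmx]
  rw [hA, hB]
  set cnt := PySem.Dict.counter cost with hcnt
  set keys := cnt.keys with hkeys
  set f := pvBInner keys cnt with hfdef
  set cands := PySem.Set.union (PySem.Set.ofList keys)
    (PySem.Set.ofList (keys.flatMap (fun x => keys.map (fun y => x + y)))) with hcands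
  have hbody : (fun (m t : Int) => max m ((keys.foldl (pvAStep t) (0, cnt, 0)).1))
      = fun m t => max m (f t) := by
    funext m t
    rw [hfdef, hcnt, hkeys, pv_inner_eq cost h0c t]
  rw [hbody]
  apply le_antisymm
  · refine pv_foldl_max_le f _ _ 0
      (pv_le_gfoldl f (fun t => mn ≤ t ∧ t ≤ 2 * mx) cands 0) ?_
    intro t ht
    by_cases hc : t ∈ cands
    · refine pv_gfoldl_mem_le f (fun t => mn ≤ t ∧ t ≤ 2 * mx) cands t ?_ 0 hc
      have := PySem.List.mem_pyRange_one.mp ht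
      omega
    · have : f t = 0 := by
        rw [hfdef, hkeys, hcnt]
        exact pv_inner_zero cost t (by rw [hcands, hkeys, hcnt] at hc; exact hc)
      rw [this]
      exact pv_le_gfoldl f (fun t => mn ≤ t ∧ t ≤ 2 * mx) cands 0
  · refine pv_gfoldl_le f (fun t => mn ≤ t ∧ t ≤ 2 * mx) cands _ 0
      (pv_le_foldl_max f _ 0) ?_
    intro t ht hp
    refine pv_foldl_max_mem_le f _ t 0 ?_
    rw [PySem.List.mem_pyRange_one]
    omega
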